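-- pv_equiv track=rewrite | github.com/RTimothyEdwards/open_pdks | common/find_all_devices.py | preferred_order
-- ===== SOURCE A (Python) =====
-- def preferred_order(subfiles, feol):
--     ordfiles = []
--     feolstr = '__' + feol
--
--     # Sort by length first, so shorter ones, e.g., without "leak" or
--     # "discrete", end up at the front of the list.
--     ordlist = sorted(subfiles, key=len)
--
--     for file in ordlist[:]:
--         if file.endswith('.corner.spice') and feolstr in file:
--             ordfiles.append(file)
--             ordlist.remove(file)
--
--     for file in ordlist[:]:
--         if file.endswith('.model.spice'):
--             ordfiles.append(file)
--             ordlist.remove(file)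
--
--     for file in ordlist[:]:
--         if file.endswith('.pm3.spice') and feolstr in file:
--             ordfiles.append(file)
--             ordlist.remove(file)
--
--     for file in ordlist[:]:
--         if file.endswith('.pm3.spice'):
--             ordfiles.append(file)
--             ordlist.remove(file)
--
--     ordfiles.extend(ordlist)
--     return ordfiles
-- ===== SOURCE B (Python) =====
-- def preferred_order(subfiles, feol):
--     feolstr = '__' + feol
--     b0, b1, b2, b3, b4 = [], [], [], [], []
--     for file in sorted(subfiles, key=len):
--         if file.endswith('.corner.spice') and feolstr in file:
--             b0.append(file)
--         elif file.endswith('.model.spice'):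
--             b1.append(file)
--         elif file.endswith('.pm3.spice') and feolstr in file:
--             b2.append(file)
--         elif file.endswith('.pm3.spice'):
--             b3.append(file)
--         else:
--             b4.append(file)
--     return b0 + b1 + b2 + b3 + b4
-- ===== Notes on version B (the rewrite author's own statement) =====
-- stated objective: simpler
-- what changed: Replaces A's four filter-and-remove rescans of the shrinking list (via list copies and .remove) with a single pass over the length-sorted list that partitions each file once into five buckets by an if/elif chain, then concatenates the buckets.
import Mathlib
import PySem

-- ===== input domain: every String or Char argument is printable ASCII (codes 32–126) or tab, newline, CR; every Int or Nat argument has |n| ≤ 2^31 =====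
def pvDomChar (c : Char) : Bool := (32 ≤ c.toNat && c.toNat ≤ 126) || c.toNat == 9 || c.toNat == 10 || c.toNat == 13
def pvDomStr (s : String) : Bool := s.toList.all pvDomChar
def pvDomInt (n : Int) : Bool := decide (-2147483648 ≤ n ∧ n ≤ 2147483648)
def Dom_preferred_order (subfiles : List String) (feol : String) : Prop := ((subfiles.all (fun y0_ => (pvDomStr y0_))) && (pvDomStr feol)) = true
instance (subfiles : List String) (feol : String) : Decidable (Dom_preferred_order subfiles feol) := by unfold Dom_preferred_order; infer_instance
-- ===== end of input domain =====

-- B replaces A's four filter-and-remove rescans with one partitioning pass into five buckets (simpler).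

-- ===== PORT A =====
-- one 'for file in ordlist[:]: if cond: ordfiles.append(file); ordlist.remove(file)' loop of A
-- (A repeats this pattern four times with different conditions); .remove never raises here,
-- so '.getD st.2' is never the fallback on the loops A runs
def pvPassA (cond : String → Bool) (ordfiles ordlist : List String) :
    List String × List String :=
  ordlist.foldl
    (fun st file =>
      if cond file then (st.1 ++ [file], (PySem.List.remove? st.2 file).getD st.2)
      else st)
    (ordfiles, ordlist)

def preferred_order (subfiles : List String) (feol : String) : List String :=
  let feolstr := "__" ++ feol
  let ordlist := PySem.List.sorted subfiles (fun f => PySem.Str.len f) false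
  let s1 := pvPassA (fun f => PySem.Str.endswith f ".corner.spice" && PySem.Str.isIn feolstr f) [] ordlist
  let s2 := pvPassA (fun f => PySem.Str.endswith f ".model.spice") s1.1 s1.2
  let s3 := pvPassA (fun f => PySem.Str.endswith f ".pm3.spice" && PySem.Str.isIn feolstr f) s2.1 s2.2
  let s4 := pvPassA (fun f => PySem.Str.endswith f ".pm3.spice") s3.1 s3.2
  s4.1 ++ s4.2

-- ===== PORT B =====
def preferred_order_alt (subfiles : List String) (feol : String) : List String :=
  let feolstr := "__" ++ feol
  let bs := (PySem.List.sorted subfiles (fun f => PySem.Str.len f) false).foldl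
    (fun (b : List String × List String × List String × List String × List String) file =>
      if PySem.Str.endswith file ".corner.spice" && PySem.Str.isIn feolstr file then
        (b.1 ++ [file], b.2.1, b.2.2.1, b.2.2.2.1, b.2.2.2.2)
      else if PySem.Str.endswith file ".model.spice" then
        (b.1, b.2.1 ++ [file], b.2.2.1, b.2.2.2.1, b.2.2.2.2)
      else if PySem.Str.endswith file ".pm3.spice" && PySem.Str.isIn feolstr file then
        (b.1, b.2.1, b.2.2.1 ++ [file], b.2.2.2.1, b.2.2.2.2)
      else if PySem.Str.endswith file ".pm3.spice" then
        (b.1, b.2.1, b.2.2.1, b.2.2.2.1 ++ [file], b.2.2.2.2)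
      else
        (b.1, b.2.1, b.2.2.1, b.2.2.2.1, b.2.2.2.2 ++ [file]))
    ([], [], [], [], [])
  bs.1 ++ bs.2.1 ++ bs.2.2.1 ++ bs.2.2.2.1 ++ bs.2.2.2.2

-- ===== PRECONDITION & SPEC =====
def Spec_preferred_order (subfiles : List String) (feol : String) (out : List String) : Prop := out = preferred_order_alt subfiles feol
instance (subfiles : List String) (feol : String) (out : List String) : Decidable (Spec_preferred_order subfiles feol out) := by unfold Spec_preferred_order; infer_instance

-- ===== CLAIM (what is proved, stated in full; the proofs are below) =====
def Claim_equal_preferred_order : Prop := ∀ (subfiles : List String) (feol : String), Dom_preferred_order subfiles feol → Spec_preferred_order subfiles feol (preferred_order subfiles feol)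

-- ===== LEMMAS AND PROOFS =====

-- one A-loop over a copy of 'pref ++ rest' (elements of pref all fail cond) computes the two filters
theorem pvPassA_go (cond : String → Bool) :
    ∀ (rest pref acc : List String), (∀ x ∈ pref, cond x = false) →
    rest.foldl
      (fun st file =>
        if cond file then (st.1 ++ [file], (PySem.List.remove? st.2 file).getD st.2)
        else st)
      (acc, pref ++ rest)
    = (acc ++ rest.filter cond, pref ++ rest.filter (fun x => !cond x)) := by
  intro rest
  induction rest with
  | nil => intro pref acc h; simp
  | cons f rest' ih =>
    intro pref acc h
    by_cases hc : cond f = true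
    · have hfp : f ∉ pref := fun hin => by simp [h f hin] at hc
      have hrem : PySem.List.remove? (pref ++ f :: rest') f = some (pref ++ rest') := by
        rw [PySem.List.remove?_eq_some_erase (pref ++ f :: rest') f (by simp)]
        rw [List.erase_append_right _ hfp, List.erase_cons_head]
      rw [List.foldl_cons]
      simp only [if_pos hc, hrem, Option.getD_some]
      rw [ih pref (acc ++ [f]) h]
      simp [hc]
    · have hc' : cond f = false := by simpa using hc
      simp only [List.foldl_cons, hc', Bool.false_eq_true, if_false]
      have : pref ++ f :: rest' = (pref ++ [f]) ++ rest' := by simp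
      rw [this, ih (pref ++ [f]) acc (by intro x hx; rcases List.mem_append.1 hx with h1 | h1
                                         · exact h x h1
                                         · simp at h1; subst h1; exact hc')]
      simp [hc']

theorem pvPassA_spec (cond : String → Bool) (acc l : List String) :
    pvPassA cond acc l = (acc ++ l.filter cond, l.filter (fun x => !cond x)) := by
  have := pvPassA_go cond l [] acc (by intro x hx; simp at hx)
  simpa [pvPassA] using this

-- B's single classifying pass computes the five (chained) filters
theorem pvClassify_spec (p1 p2 p3 p4 : String → Bool) :
    ∀ (l : List String) (b0 b1 b2 b3 b4 : List String),
    l.foldl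
      (fun (b : List String × List String × List String × List String × List String) file =>
        if p1 file then (b.1 ++ [file], b.2.1, b.2.2.1, b.2.2.2.1, b.2.2.2.2)
        else if p2 file then (b.1, b.2.1 ++ [file], b.2.2.1, b.2.2.2.1, b.2.2.2.2)
        else if p3 file then (b.1, b.2.1, b.2.2.1 ++ [file], b.2.2.2.1, b.2.2.2.2)
        else if p4 file then (b.1, b.2.1, b.2.2.1, b.2.2.2.1 ++ [file], b.2.2.2.2)
        else (b.1, b.2.1, b.2.2.1, b.2.2.2.1, b.2.2.2.2 ++ [file]))
      (b0, b1, b2, b3, b4)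
    = (b0 ++ l.filter p1,
       b1 ++ l.filter (fun x => !p1 x && p2 x),
       b2 ++ l.filter (fun x => !p1 x && !p2 x && p3 x),
       b3 ++ l.filter (fun x => !p1 x && !p2 x && !p3 x && p4 x),
       b4 ++ l.filter (fun x => !p1 x && !p2 x && !p3 x && !p4 x)) := by
  intro l
  induction l with
  | nil => intro b0 b1 b2 b3 b4; simp
  | cons f t ih =>
    intro b0 b1 b2 b3 b4
    simp only [List.foldl_cons]
    by_cases h1 : p1 f = true
    · rw [if_pos h1, ih]; simp [h1]
    · have h1' : p1 f = false := by simpa using h1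
      rw [if_neg (by simp [h1'])]
      by_cases h2 : p2 f = true
      · rw [if_pos h2, ih]; simp [h1', h2]
      · have h2' : p2 f = false := by simpa using h2
        rw [if_neg (by simp [h2'])]
        by_cases h3 : p3 f = true
        · rw [if_pos h3, ih]; simp [h1', h2', h3]
        · have h3' : p3 f = false := by simpa using h3
          rw [if_neg (by simp [h3'])]
          by_cases h4 : p4 f = true
          · rw [if_pos h4, ih]; simp [h1', h2', h3', h4]
          · have h4' : p4 f = false := by simpa using h4
            rw [if_neg (by simp [h4']), ih]
            simp [h1', h2', h3', h4']

-- the generic fact: four filter-and-remove passes = one five-way partition, any predicates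
theorem four_pass_eq_partition (p1 p2 p3 p4 : String → Bool) (l : List String) :
    ((pvPassA p4 (pvPassA p3 (pvPassA p2 (pvPassA p1 [] l).1 (pvPassA p1 [] l).2).1
        (pvPassA p2 (pvPassA p1 [] l).1 (pvPassA p1 [] l).2).2).1
        (pvPassA p3 (pvPassA p2 (pvPassA p1 [] l).1 (pvPassA p1 [] l).2).1
        (pvPassA p2 (pvPassA p1 [] l).1 (pvPassA p1 [] l).2).2).2).1
     ++ (pvPassA p4 (pvPassA p3 (pvPassA p2 (pvPassA p1 [] l).1 (pvPassA p1 [] l).2).1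
        (pvPassA p2 (pvPassA p1 [] l).1 (pvPassA p1 [] l).2).2).1
        (pvPassA p3 (pvPassA p2 (pvPassA p1 [] l).1 (pvPassA p1 [] l).2).1
        (pvPassA p2 (pvPassA p1 [] l).1 (pvPassA p1 [] l).2).2).2).2)
    = (l.filter p1
       ++ l.filter (fun x => !p1 x && p2 x)
       ++ l.filter (fun x => !p1 x && !p2 x && p3 x)
       ++ l.filter (fun x => !p1 x && !p2 x && !p3 x && p4 x)
       ++ l.filter (fun x => !p1 x && !p2 x && !p3 x && !p4 x)) := by
  simp only [pvPassA_spec, List.filter_filter]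
  have e2 : ∀ x : String, (p2 x && !p1 x) = (!p1 x && p2 x) := by
    intro x; cases p1 x <;> cases p2 x <;> rfl
  have e3 : ∀ x : String, (p3 x && (!p2 x && !p1 x)) = (!p1 x && !p2 x && p3 x) := by
    intro x; cases p1 x <;> cases p2 x <;> cases p3 x <;> rfl
  have e4 : ∀ x : String, (p4 x && (!p3 x && (!p2 x && !p1 x))) = (!p1 x && !p2 x && !p3 x && p4 x) := by
    intro x; cases p1 x <;> cases p2 x <;> cases p3 x <;> cases p4 x <;> rfl
  have e5 : ∀ x : String, (!p4 x && (!p3 x && (!p2 x && !p1 x))) = (!p1 x && !p2 x && !p3 x && !p4 x) := by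
    intro x; cases p1 x <;> cases p2 x <;> cases p3 x <;> cases p4 x <;> rfl
  simp only [List.filter_congr (fun x _ => e2 x), List.filter_congr (fun x _ => e3 x),
             List.filter_congr (fun x _ => e4 x), List.filter_congr (fun x _ => e5 x)]
  simp [List.append_assoc]

-- ===== VERDICT (by name: the statement is the Claim_ definition above) =====
theorem preferred_order_spec : Claim_equal_preferred_order := by
  intro subfiles feol _
  unfold Spec_preferred_order preferred_order preferred_order_alt
  dsimp only []
  rw [four_pass_eq_partition, pvClassify_spec]
  simp [List.append_assoc]
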